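-- pv_equiv track=rewrite | github.com/Canziyos/learning-algorithms | evolutionary_computation/crossover_t.py | expected_fill_order
-- ===== SOURCE A (Python) =====
-- def wrap_next(idx, n):
--     return 1 if idx >= n-2 else idx+1
--
-- def expected_fill_order(p2, in_slice, start_after, n):
--     # iterate parent2 middle indices in wrap order, skipping slice cities
--     order = []
--     rp = wrap_next(start_after, n)
--     for _ in range(n-2):
--         c = p2[rp]
--         if c not in in_slice:
--             order.append(c)
--         rp = wrap_next(rp, n)
--     return order
-- ===== SOURCE B (Python) =====
-- def expected_fill_order(p2, in_slice, start_after, n):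
--     # slice-rotation re-implementation: rotate the middle section, then filter once
--     if n < 3:
--         return []
--     middle = p2[1:n-1]
--     offset = 0 if start_after >= n - 2 else start_after
--     rotated = middle[offset:] + middle[:offset]
--     return [c for c in rotated if c not in in_slice]
-- ===== Notes on version B (the rewrite author's own statement) =====
-- stated objective: simpler
-- what changed: Replaces the per-step wrap_next index loop with one rotated slice of the middle section (middle[offset:] + middle[:offset]) followed by a single filter pass; the wrap_next helper disappears.
-- outside the precondition, e.g. on expected_fill_order([10, 20, 30, 40], set(), -1, 4): A returns [10, 20], B returns [30, 20]
import Mathlib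
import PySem

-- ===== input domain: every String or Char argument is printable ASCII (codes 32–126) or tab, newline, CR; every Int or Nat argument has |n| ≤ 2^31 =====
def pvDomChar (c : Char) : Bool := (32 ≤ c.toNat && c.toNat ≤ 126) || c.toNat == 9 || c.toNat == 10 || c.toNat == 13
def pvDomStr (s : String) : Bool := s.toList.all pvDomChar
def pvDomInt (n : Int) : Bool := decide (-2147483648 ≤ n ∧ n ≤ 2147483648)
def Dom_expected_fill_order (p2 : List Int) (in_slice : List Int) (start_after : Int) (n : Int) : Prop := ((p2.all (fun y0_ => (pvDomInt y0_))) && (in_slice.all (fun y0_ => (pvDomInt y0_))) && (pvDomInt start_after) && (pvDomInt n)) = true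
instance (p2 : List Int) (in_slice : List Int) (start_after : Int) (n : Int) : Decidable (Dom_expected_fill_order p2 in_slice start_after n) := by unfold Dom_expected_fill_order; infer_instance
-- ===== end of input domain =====

-- B replaces A's per-step wrap-index loop by one rotated slice of the middle section plus a single
-- filter pass (objective: simpler; same asymptotic cost).

-- ===== PORT A =====
def wrap_next (idx : Int) (n : Int) : Int := if idx ≥ n - 2 then 1 else idx + 1

-- the for-loop of A: k iterations left, current index rp, accumulator order.
-- p2[rp] is PySem.List.pyGet?; under Pre_ the index is always in range, so the .getD 0 never fires.
def efoLoop (p2 : List Int) (in_slice : List Int) (n : Int) : Nat → Int → List Int → List Int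
  | 0, _, order => order
  | k+1, rp, order =>
    let c := (PySem.List.pyGet? p2 rp).getD 0
    efoLoop p2 in_slice n k (wrap_next rp n) (if in_slice.contains c then order else order ++ [c])

def expected_fill_order (p2 : List Int) (in_slice : List Int) (start_after : Int) (n : Int) : List Int :=
  efoLoop p2 in_slice n (n - 2).toNat (wrap_next start_after n) []

-- ===== PORT B =====
def expected_fill_order_alt (p2 : List Int) (in_slice : List Int) (start_after : Int) (n : Int) : List Int :=
  if n < 3 then []
  else
    let middle := PySem.List.slice p2 (some 1) (some (n - 1))
    let offset : Int := if start_after ≥ n - 2 then 0 else start_after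
    let rotated := PySem.List.slice middle (some offset) none ++ PySem.List.slice middle none (some offset)
    rotated.filter (fun c => !(in_slice.contains c))

-- ===== PRECONDITION & SPEC =====
-- Pre_ restricts to the function's natural domain: start_after is a (non-negative) tour index, and
-- p2 is long enough that every middle index 1..n-2 that A touches exists, so A never raises
-- IndexError and never falls back to Python's negative-index wraparound.  It excludes negative
-- start_after, on which A still returns a value via raw negative indexing (outside the intended
-- index domain); see the cite in claim.json.
def Pre_expected_fill_order (p2 : List Int) (in_slice : List Int) (start_after : Int) (n : Int) : Prop :=
  3 ≤ n → (0 ≤ start_after ∧ n ≤ (p2.length : Int) + 1)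
instance (p2 : List Int) (in_slice : List Int) (start_after : Int) (n : Int) : Decidable (Pre_expected_fill_order p2 in_slice start_after n) := by unfold Pre_expected_fill_order; infer_instance

def pvWitness_expected_fill_order : List Int × List Int × Int × Int := ([5, 6, 7, 8], [6], 1, 4)

def Spec_expected_fill_order (p2 : List Int) (in_slice : List Int) (start_after : Int) (n : Int) (out : List Int) : Prop := out = expected_fill_order_alt p2 in_slice start_after n
instance (p2 : List Int) (in_slice : List Int) (start_after : Int) (n : Int) (out : List Int) : Decidable (Spec_expected_fill_order p2 in_slice start_after n out) := by unfold Spec_expected_fill_order; infer_instance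

-- ===== CLAIM (what is proved, stated in full; the proofs are below) =====
def Claim_equal_expected_fill_order : Prop := ∀ (p2 : List Int) (in_slice : List Int) (start_after : Int) (n : Int), Dom_expected_fill_order p2 in_slice start_after n → Pre_expected_fill_order p2 in_slice start_after n → Spec_expected_fill_order p2 in_slice start_after n (expected_fill_order p2 in_slice start_after n)

-- ===== LEMMAS AND PROOFS =====

-- the bare index sequence visited by A's loop (k steps from rp), without the filter/accumulator
def seqA (p2 : List Int) (n : Int) : Nat → Int → List Int
  | 0, _ => []
  | k+1, rp => (PySem.List.pyGet? p2 rp).getD 0 :: seqA p2 n k (wrap_next rp n)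

theorem efoLoop_eq_filter_seqA (p2 in_slice : List Int) (n : Int) :
    ∀ (k : Nat) (rp : Int) (order : List Int),
      efoLoop p2 in_slice n k rp order
        = order ++ (seqA p2 n k rp).filter (fun c => !(in_slice.contains c)) := by
  intro k
  induction k with
  | zero => intro rp order; simp [efoLoop, seqA]
  | succ k ih =>
    intro rp order
    simp only [efoLoop, seqA]
    by_cases h : ((PySem.List.pyGet? p2 rp).getD 0) ∈ in_slice
    · simp [h, ih]
    · simp [h, ih, List.append_assoc]

-- no-wrap segment: k steps starting at index r (1 ≤ r, r + k ≤ m + 1) read p2[r], …, p2[r+k-1]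
theorem seqA_no_wrap (p2 : List Int) (n : Int) (m : Nat) (hn : n = (m : Int) + 2)
    (hlen : m + 1 ≤ p2.length) :
    ∀ (k r : Nat), 1 ≤ r → r + k ≤ m + 1 →
      seqA p2 n k (r : Int) = (p2.drop r).take k := by
  intro k
  induction k with
  | zero => intro r _ _; simp [seqA]
  | succ k ih =>
    intro r hr1 hrk
    have hrlt : r < p2.length := by omega
    have hget : PySem.List.pyGet? p2 (r : Int) = some p2[r] := by simp [pysem]
    rw [List.drop_eq_getElem_cons hrlt, List.take_succ_cons]
    by_cases hk : k = 0
    · subst hk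
      simp only [seqA, hget, Option.getD_some, List.take_zero]
    · have hrm : r < m := by omega
      have hwrap : wrap_next (r : Int) n = ((r + 1 : Nat) : Int) := by
        simp only [wrap_next, hn]
        rw [if_neg (by push_cast; omega)]
        push_cast
        ring
      simp only [seqA, hget, Option.getD_some, hwrap]
      rw [ih (r + 1) (by omega) (by omega)]

-- splitting at the wrap point: a steps from r reach index m and wrap back to 1
theorem seqA_split (p2 : List Int) (n : Int) (m : Nat) (_hm : 1 ≤ m) (hn : n = (m : Int) + 2) :
    ∀ (a b r : Nat), 1 ≤ r → r ≤ m → r + a = m + 1 →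
      seqA p2 n (a + b) (r : Int) = seqA p2 n a (r : Int) ++ seqA p2 n b ((1 : Nat) : Int) := by
  intro a
  induction a with
  | zero => intro b r _ hr2 hra; omega
  | succ a ih =>
    intro b r hr1 hr2 hra
    have hstep : a + 1 + b = (a + b) + 1 := by omega
    rw [hstep]
    by_cases hrm : r = m
    · have ha0 : a = 0 := by omega
      subst ha0
      have hwrap : wrap_next (r : Int) n = ((1 : Nat) : Int) := by
        rw [wrap_next, if_pos (by rw [hn, hrm]; push_cast; omega)]
        norm_num
      simp only [seqA, hwrap]
      simp
    · have hwrap : wrap_next (r : Int) n = ((r + 1 : Nat) : Int) := by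
        simp only [wrap_next, hn]
        rw [if_neg (by push_cast; omega)]
        push_cast
        ring
      simp only [seqA, hwrap]
      rw [ih b (r + 1) (by omega) (by omega) (by omega)]
      simp

-- ===== VERDICT (by name: the statement is the Claim_ definition above) =====
theorem expected_fill_order_spec : Claim_equal_expected_fill_order := by
  intro p2 in_slice start_after n _ hpre
  unfold Spec_expected_fill_order
  by_cases hn3 : n < 3
  · have h0 : (n - 2).toNat = 0 := by omega
    simp [expected_fill_order, expected_fill_order_alt, hn3, h0, efoLoop]
  · -- n ≥ 3
    rw [not_lt] at hn3
    obtain ⟨hsa, hlen'⟩ := hpre hn3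
    set m : Nat := (n - 2).toNat with hmdef
    have hn : n = (m : Int) + 2 := by omega
    have hm1 : 1 ≤ m := by omega
    have hlen : m + 1 ≤ p2.length := by
      omega
    -- the starting index as a natural number
    set r0 : Nat := if start_after ≥ n - 2 then 1 else start_after.toNat + 1 with hr0def
    have hr01 : 1 ≤ r0 := by rw [hr0def]; split <;> omega
    have hr0m : r0 ≤ m := by
      rw [hr0def]; split
      · omega
      · next h => omega
    have hwrap0 : wrap_next start_after n = (r0 : Int) := by
      rw [wrap_next, hr0def]
      by_cases h : start_after ≥ n - 2
      · rw [if_pos h, if_pos h]; norm_num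
      · rw [if_neg h, if_neg h]; push_cast; omega
    -- LHS: loop → filtered index sequence → two no-wrap segments
    have hA : expected_fill_order p2 in_slice start_after n
        = (((p2.drop r0).take (m + 1 - r0) ++ (p2.drop 1).take (r0 - 1)).filter
            (fun c => !(in_slice.contains c))) := by
      rw [expected_fill_order, hwrap0, ← hmdef,
        efoLoop_eq_filter_seqA, List.nil_append]
      have hmsum : m = (m + 1 - r0) + (r0 - 1) := by omega
      have hsplit : seqA p2 n m (r0 : Int)
          = seqA p2 n (m + 1 - r0) (r0 : Int) ++ seqA p2 n (r0 - 1) ((1 : Nat) : Int) := by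
        conv_lhs => rw [hmsum]
        exact seqA_split p2 n m hm1 hn (m + 1 - r0) (r0 - 1) r0 hr01 hr0m (by omega)
      rw [hsplit,
        seqA_no_wrap p2 n m hn hlen (m + 1 - r0) r0 hr01 (by omega),
        seqA_no_wrap p2 n m hn hlen (r0 - 1) 1 (by omega) (by omega)]
    -- RHS: the rotated slice
    have hB : expected_fill_order_alt p2 in_slice start_after n
        = ((((p2.drop 1).take m).drop (r0 - 1) ++ ((p2.drop 1).take m).take (r0 - 1)).filter
            (fun c => !(in_slice.contains c))) := by
      rw [expected_fill_order_alt, if_neg (by omega)]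
      have hmid : PySem.List.slice p2 (some 1) (some (n - 1)) = (p2.drop 1).take m := by
        have h2 : n - 1 = ((m + 1 : Nat) : Int) := by push_cast; omega
        have h1 : (1 : Int) = ((1 : Nat) : Int) := by norm_num
        rw [h2, h1, PySem.List.slice_natCast]
        simp
      have hoff : (if start_after ≥ n - 2 then (0 : Int) else start_after) = ((r0 - 1 : Nat) : Int) := by
        rw [hr0def]
        by_cases h : start_after ≥ n - 2
        · rw [if_pos h, if_pos h]; norm_num
        · rw [if_neg h, if_neg h, Nat.add_sub_cancel]
          exact (Int.toNat_of_nonneg hsa).symm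
      simp only [hmid, hoff, PySem.List.slice_from_natCast, PySem.List.slice_to_natCast]
    clear_value m r0
    rw [hA, hB]
    congr 1
    have e1 : ((p2.drop 1).take m).drop (r0 - 1) = (p2.drop r0).take (m + 1 - r0) := by
      have hm' : m - (r0 - 1) = m + 1 - r0 := by omega
      have hr' : 1 + (r0 - 1) = r0 := by omega
      rw [List.drop_take, List.drop_drop, hm', hr']
    have e2 : ((p2.drop 1).take m).take (r0 - 1) = (p2.drop 1).take (r0 - 1) := by
      rw [List.take_take, Nat.min_eq_left (by omega)]
    rw [e1, e2]
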